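-- pv_equiv track=rewrite | github.com/asgin/task_1-and-unittest | task 1/task-1.py | reverse_non_symbols
-- ===== SOURCE A (Python) =====
-- def reverse_non_symbols(text):
--     res = ''
--     for i in text.split():
--         for j in i[::-1]:
--             if j.isalpha():
--                 res += j
--     s = dict(enumerate(text))
--     for i, j in s.items():
--         if j.isalpha():
--             s[i] = ''
--     c = 0
--     for i, j in s.items():
--         if j == '':
--             s[i] = res[c]
--             c += 1
--     return ''.join(list(s.values()))
-- ===== SOURCE B (Python) =====
-- def reverse_non_symbols(text):
--     # One left-to-right scan: whitespace is copied verbatim; each maximal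
--     # non-whitespace token has its alphabetic chars reversed in place by
--     # popping a collected letter stack; no global buffer, no dict rebuild.
--     pieces = []
--     i = 0
--     n = len(text)
--     while i < n:
--         if text[i].isspace():
--             pieces.append(text[i])
--             i += 1
--             continue
--         j = i
--         while j < n and not text[j].isspace():
--             j += 1
--         token = text[i:j]
--         letters = [c for c in token if c.isalpha()]
--         for c in token:
--             if c.isalpha():
--                 pieces.append(letters.pop())  # last letter first = reversal
--             else:
--                 pieces.append(c)
--         i = j
--     return ''.join(pieces)
-- ===== Notes on version B (the rewrite author's own statement) =====
-- stated objective: simpler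
-- what changed: A builds a global reversed-letter buffer via str.split, then rebuilds the text through an int-keyed dict (enumerate, blank the alpha slots, refill them from the buffer); B is one linear scan that copies whitespace verbatim and, per non-whitespace token, reverses the alphabetic chars in place by popping a local letter stack.
import Mathlib
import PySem

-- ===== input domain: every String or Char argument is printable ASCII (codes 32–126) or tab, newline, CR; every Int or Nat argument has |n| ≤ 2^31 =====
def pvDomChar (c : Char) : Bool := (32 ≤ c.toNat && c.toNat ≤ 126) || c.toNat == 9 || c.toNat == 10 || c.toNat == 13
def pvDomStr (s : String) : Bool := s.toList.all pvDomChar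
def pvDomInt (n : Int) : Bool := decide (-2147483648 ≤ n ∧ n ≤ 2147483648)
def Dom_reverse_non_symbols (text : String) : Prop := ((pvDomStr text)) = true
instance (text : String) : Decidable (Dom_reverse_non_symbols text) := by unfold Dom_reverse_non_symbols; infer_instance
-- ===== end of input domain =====

-- B replaces A's split/global-buffer/dict-rebuild pipeline by one linear scan that copies
-- whitespace verbatim and reverses each token's alphabetic chars in place (objective: simpler).

-- ===== PORT A =====
-- A, step for step: res accumulates, word by word, the alpha chars of each reversed word;
-- then dict(enumerate(text)); then blank every alpha slot; then refill blanks from res; join values.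
def reverse_non_symbols (text : String) : String :=
  let cs := text.toList
  let res : List Char := (PySem.Chars.split₀ cs).foldl
    (fun r w => w.reverse.foldl (fun r j => if PySem.Chars.isalpha j then r ++ [j] else r) r) []
  let s0 : PySem.Dict Int (List Char) :=
    PySem.Dict.ofList ((PySem.List.enumerate cs).map (fun p => (p.1, [p.2])))
  -- 'for i, j in s.items(): if j.isalpha(): s[i] = ""' — each step touches only the visited
  -- key, so folding over the snapshot of the items list is exact
  let s1 := s0.items.foldl
    (fun d p => if PySem.Chars.strIsalpha p.2 then d.insert p.1 ([] : List Char) else d) s0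
  -- 'c = 0; for i, j in s.items(): if j == "": s[i] = res[c]; c += 1'
  -- res[c] is in range whenever Python reaches it (res holds one char per alpha slot);
  -- the none branch of pyGet? is unreachable and ported as the empty string.
  let s2 := (s1.items.foldl
    (fun (st : PySem.Dict Int (List Char) × Int) p =>
      if p.2 = ([] : List Char) then
        (st.1.insert p.1 ((PySem.List.pyGet? res st.2).elim [] (fun ch => [ch])), st.2 + 1)
      else st) (s1, (0 : Int))).1
  String.ofList (PySem.Chars.join [] s2.values)

-- ===== PORT B =====
-- 'for c in token: pieces.append(letters.pop() if c.isalpha() else c)' — pop takes the LAST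
-- collected letter; letters is nonempty whenever the alpha branch runs, so the .getD default
-- is unreachable.
def pvFix : List Char → List Char → List Char
  | _, [] => []
  | letters, c :: t =>
    if PySem.Chars.isalpha c then (letters.getLast?).getD c :: pvFix letters.dropLast t
    else c :: pvFix letters t

-- the outer while-loop: copy a whitespace char, or process one maximal non-whitespace token
def pvAltGo : List Char → List Char
  | [] => []
  | c :: t =>
    if PySem.Chars.isspace c then c :: pvAltGo t
    else
      pvFix ((c :: t.takeWhile (fun x => !PySem.Chars.isspace x)).filter PySem.Chars.isalpha)
            (c :: t.takeWhile (fun x => !PySem.Chars.isspace x))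
        ++ pvAltGo (t.dropWhile (fun x => !PySem.Chars.isspace x))
termination_by cs => cs.length
decreasing_by
  · simp
  · exact Nat.lt_succ_of_le (List.length_dropWhile_le _ _)

def reverse_non_symbols_alt (text : String) : String :=
  String.ofList (pvAltGo text.toList)

-- ===== PRECONDITION & SPEC =====
def Spec_reverse_non_symbols (text : String) (out : String) : Prop := out = reverse_non_symbols_alt text
instance (text : String) (out : String) : Decidable (Spec_reverse_non_symbols text out) := by unfold Spec_reverse_non_symbols; infer_instance

-- ===== CLAIM (what is proved, stated in full; the proofs are below) =====
def Claim_equal_reverse_non_symbols : Prop := ∀ (text : String), Dom_reverse_non_symbols text → Spec_reverse_non_symbols text (reverse_non_symbols text)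

-- ===== LEMMAS AND PROOFS =====

-- structural version of str.split() on whitespace
def pvWsplit : List Char → List (List Char)
  | [] => []
  | c :: t =>
    if PySem.Chars.isspace c then pvWsplit t
    else (c :: t.takeWhile (fun x => !PySem.Chars.isspace x))
          :: pvWsplit (t.dropWhile (fun x => !PySem.Chars.isspace x))
termination_by cs => cs.length
decreasing_by
  · simp
  · exact Nat.lt_succ_of_le (List.length_dropWhile_le _ _)

-- the reversed-letter buffer A builds, word by word
def pvRes (cs : List Char) : List Char :=
  ((pvWsplit cs).map (fun w => (w.filter PySem.Chars.isalpha).reverse)).flatten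

-- refill the alpha slots of cs from res, indexing from counter k (A's second dict loop, flattened)
def pvFillA (res : List Char) : List Char → Int → List Char
  | [], _ => []
  | c :: t, k =>
    if PySem.Chars.isalpha c then
      ((PySem.List.pyGet? res k).elim [] (fun ch => [ch])) ++ pvFillA res t (k + 1)
    else c :: pvFillA res t k

-- same refill, consuming the replacement list from the front
def pvFillF : List Char → List Char → List Char
  | [], _ => []
  | c :: t, ls =>
    if PySem.Chars.isalpha c then (ls.head?.elim [] (fun ch => [ch])) ++ pvFillF t ls.tail
    else c :: pvFillF t ls

-- the items list A's second loop produces, as a pure map with a threaded counter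
def pvMapCtr (res : List Char) : List (Int × List Char) → Int → List (Int × List Char)
  | [], _ => []
  | p :: t, c =>
    if p.2 = ([] : List Char) then
      (p.1, (PySem.List.pyGet? res c).elim [] (fun ch => [ch])) :: pvMapCtr res t (c + 1)
    else p :: pvMapCtr res t c

lemma pv_space_not_alpha {c : Char} (h : PySem.Chars.isspace c = true) :
    PySem.Chars.isalpha c = false := by
  simp [PySem.Chars.isspace] at h
  simp [PySem.Chars.isalpha, PySem.Chars.isupper, PySem.Chars.islower, Char.le_def,
    UInt32.le_iff_toNat_le, Char.toNat_val] at h ⊢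
  omega

lemma pv_go_eq (s cur : List Char) (acc : List (List Char)) :
    PySem.Chars.split₀.go s cur acc
      = acc.reverse ++ (if cur = [] then pvWsplit s
          else (cur.reverse ++ s.takeWhile (fun x => !PySem.Chars.isspace x))
                :: pvWsplit (s.dropWhile (fun x => !PySem.Chars.isspace x))) := by
  induction s generalizing cur acc with
  | nil =>
    rw [PySem.Chars.split₀.go]
    by_cases hc : cur = [] <;> simp [hc, pvWsplit]
  | cons c t ih =>
    rw [PySem.Chars.split₀.go]
    by_cases hsp : PySem.Chars.isspace c
    · by_cases hc : cur = []
      · simp only [hsp, hc, List.isEmpty_nil, ite_true]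
        rw [ih]
        simp [pvWsplit, hsp]
      · have he : cur.isEmpty = false := by simp [hc]
        simp only [hsp, he, ite_true, ite_false, Bool.false_eq_true]
        rw [ih]
        simp [pvWsplit, hsp, hc]
    · simp only [hsp, if_false, Bool.false_eq_true, ite_false]
      rw [ih]
      by_cases hc : cur = [] <;> simp [pvWsplit, hsp, hc]

lemma pv_split₀_eq (cs : List Char) : PySem.Chars.split₀ cs = pvWsplit cs := by
  rw [PySem.Chars.split₀, pv_go_eq]
  simp

lemma pv_res_eq (cs : List Char) :
    (PySem.Chars.split₀ cs).foldl
      (fun r w => w.reverse.foldl (fun r j => if PySem.Chars.isalpha j then r ++ [j] else r) r) []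
      = pvRes cs := by
  rw [pv_split₀_eq]
  have hfun : (fun (r w : List Char) =>
      w.reverse.foldl (fun r j => if PySem.Chars.isalpha j then r ++ [j] else r) r)
      = fun r w => r ++ (w.filter PySem.Chars.isalpha).reverse := by
    funext r w
    simpa [List.filter_reverse] using
      PySem.List.foldl_append_if PySem.Chars.isalpha id w.reverse r
  rw [hfun, PySem.List.foldl_append_eq_flatMap]
  simp [pvRes, List.flatMap_def]

lemma pv_items_foldl_condins {ν : Type} [DecidableEq ν] (P : Int × ν → Bool) (f : Int × ν → ν) :
    ∀ (l pre : List (Int × ν)) (d : PySem.Dict Int ν),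
      d.items = pre ++ l → ((pre ++ l).map Prod.fst).Nodup →
      (l.foldl (fun d' p => if P p then d'.insert p.1 (f p) else d') d).items
        = pre ++ l.map (fun p => if P p then (p.1, f p) else p) := by
  intro l
  induction l with
  | nil => intro pre d hd _; simpa using hd
  | cons p t ih =>
    intro pre d hd hnd
    have hnd' := hnd
    simp [List.nodup_append] at hnd'
    have hpre : ∀ q ∈ pre, q.1 ≠ p.1 := by
      intro q hq
      exact (hnd'.2.2 q.1 q.2 (by simpa using hq)).1
    have ht : ∀ q ∈ t, q.1 ≠ p.1 := by
      intro q hq h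
      have hmem : (q.1, q.2) ∈ t := by simpa using hq
      rw [h] at hmem
      exact hnd'.2.1.1 q.2 hmem
    simp only [List.foldl_cons]
    by_cases hP : P p
    · have hmem : p ∈ d.items := by rw [hd]; simp
      have hcont : d.contains p.1 = true := by
        rw [PySem.Dict.contains_iff_mem_keys]
        simp only [PySem.Dict.keys]
        exact List.mem_map_of_mem hmem
      have hitems : (d.insert p.1 (f p)).items = pre ++ (p.1, f p) :: t := by
        rw [PySem.Dict.items_insert_of_contains _ _ hcont, hd]
        rw [List.map_append, List.map_cons]
        congr 1
        · conv_rhs => rw [← List.map_id pre]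
          apply List.map_congr_left
          intro q hq
          simp [hpre q hq]
        · simp only [BEq.rfl, if_pos]
          congr 1
          conv_rhs => rw [← List.map_id t]
          apply List.map_congr_left
          intro q hq
          simp [ht q hq]
      rw [if_pos hP]
      have hfst : ((pre ++ [(p.1, f p)]) ++ t).map Prod.fst = (pre ++ p :: t).map Prod.fst := by
        simp
      have := ih (pre ++ [(p.1, f p)]) (d.insert p.1 (f p)) (by simpa using hitems)
        (by rw [hfst]; exact hnd)
      rw [this]
      simp [hP]
    · rw [if_neg hP]
      have hfst : ((pre ++ [p]) ++ t).map Prod.fst = (pre ++ p :: t).map Prod.fst := by simp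
      have := ih (pre ++ [p]) d (by simpa using hd) (by rw [hfst]; exact hnd)
      rw [this]
      simp [hP]

lemma pv_items_foldl_ctrins (res : List Char) :
    ∀ (l pre : List (Int × List Char)) (d : PySem.Dict Int (List Char)) (c : Int),
      d.items = pre ++ l → ((pre ++ l).map Prod.fst).Nodup →
      ((l.foldl
        (fun (st : PySem.Dict Int (List Char) × Int) p =>
          if p.2 = ([] : List Char) then
            (st.1.insert p.1 ((PySem.List.pyGet? res st.2).elim [] (fun ch => [ch])), st.2 + 1)
          else st) (d, c)).1).items
        = pre ++ pvMapCtr res l c := by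
  intro l
  induction l with
  | nil => intro pre d c hd _; simpa [pvMapCtr] using hd
  | cons p t ih =>
    intro pre d c hd hnd
    have hnd' := hnd
    simp [List.nodup_append] at hnd'
    have hpre : ∀ q ∈ pre, q.1 ≠ p.1 := by
      intro q hq
      exact (hnd'.2.2 q.1 q.2 (by simpa using hq)).1
    have ht : ∀ q ∈ t, q.1 ≠ p.1 := by
      intro q hq h
      have hmem : (q.1, q.2) ∈ t := by simpa using hq
      rw [h] at hmem
      exact hnd'.2.1.1 q.2 hmem
    simp only [List.foldl_cons]
    by_cases hP : p.2 = ([] : List Char)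
    · have hmem : p ∈ d.items := by rw [hd]; simp
      have hcont : d.contains p.1 = true := by
        rw [PySem.Dict.contains_iff_mem_keys]
        simp only [PySem.Dict.keys]
        exact List.mem_map_of_mem hmem
      have hitems : (d.insert p.1 ((PySem.List.pyGet? res c).elim [] (fun ch => [ch]))).items
          = pre ++ (p.1, (PySem.List.pyGet? res c).elim [] (fun ch => [ch])) :: t := by
        rw [PySem.Dict.items_insert_of_contains _ _ hcont, hd]
        rw [List.map_append, List.map_cons]
        congr 1
        · conv_rhs => rw [← List.map_id pre]
          apply List.map_congr_left
          intro q hq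
          simp [hpre q hq]
        · simp only [BEq.rfl, if_pos]
          congr 1
          conv_rhs => rw [← List.map_id t]
          apply List.map_congr_left
          intro q hq
          simp [ht q hq]
      rw [if_pos hP]
      have hfst : ((pre ++ [(p.1, (PySem.List.pyGet? res c).elim [] (fun ch => [ch]))]) ++ t).map
          Prod.fst = (pre ++ p :: t).map Prod.fst := by simp
      have := ih (pre ++ [(p.1, (PySem.List.pyGet? res c).elim [] (fun ch => [ch]))])
        (d.insert p.1 ((PySem.List.pyGet? res c).elim [] (fun ch => [ch]))) (c + 1)
        (by simpa using hitems) (by rw [hfst]; exact hnd)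
      rw [this]
      simp [pvMapCtr, hP]
    · rw [if_neg hP]
      have hfst : ((pre ++ [p]) ++ t).map Prod.fst = (pre ++ p :: t).map Prod.fst := by simp
      have := ih (pre ++ [p]) d c (by simpa using hd) (by rw [hfst]; exact hnd)
      rw [this]
      simp [pvMapCtr, hP]

lemma pv_chain (res : List Char) :
    ∀ (cs : List Char) (s c : Int),
      ((pvMapCtr res
          (((PySem.List.enumerate cs s).map (fun p => (p.1, ([p.2] : List Char)))).map
            (fun p => if PySem.Chars.strIsalpha p.2 then (p.1, ([] : List Char)) else p)) c).map
        (fun x => x.2)).flatten = pvFillA res cs c := by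
  intro cs
  induction cs with
  | nil => intro s c; simp [pvMapCtr, pvFillA, PySem.List.enumerate]
  | cons ch t ih =>
    intro s c
    rw [PySem.List.enumerate_cons]
    by_cases ha : PySem.Chars.isalpha ch
    · have hsa : PySem.Chars.strIsalpha [ch] = true := by simp [PySem.Chars.strIsalpha, ha]
      simp only [List.map_cons, hsa, if_pos, pvMapCtr, pvFillA, ha, if_true]
      simp only [List.flatten_cons]
      rw [ih (s+1) (c+1)]
    · have hsa : PySem.Chars.strIsalpha [ch] = false := by
        simp [PySem.Chars.strIsalpha, ha]
      have hne : ([ch] : List Char) ≠ [] := by simp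
      simp only [List.map_cons, hsa, Bool.false_eq_true, if_false, pvMapCtr, hne, pvFillA, ha,
        List.flatten_cons]
      rw [ih (s+1) c]
      simp

lemma pv_fillA_eq_fillF (res : List Char) :
    ∀ (cs : List Char) (k : Nat), pvFillA res cs (k : Int) = pvFillF cs (res.drop k) := by
  intro cs
  induction cs with
  | nil => intro k; simp [pvFillA, pvFillF]
  | cons c t ih =>
    intro k
    by_cases ha : PySem.Chars.isalpha c
    · simp only [pvFillA, pvFillF, ha, if_true]
      rw [PySem.List.pyGet?_natCast]
      have h1 : ((k : Int) + 1) = ((k + 1 : Nat) : Int) := by push_cast; ring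
      rw [h1, ih (k + 1)]
      congr 1
      · rw [List.head?_drop]
      · congr 1
        rw [List.tail_drop]
    · simp only [pvFillA, pvFillF, ha, Bool.false_eq_true, if_false]
      rw [ih k]

lemma pv_fillF_append (x y ls : List Char) :
    pvFillF (x ++ y) ls = pvFillF x ls ++ pvFillF y (ls.drop (x.countP PySem.Chars.isalpha)) := by
  induction x generalizing ls with
  | nil => simp [pvFillF]
  | cons c t ih =>
    by_cases ha : PySem.Chars.isalpha c
    · simp only [List.cons_append, pvFillF, ha, if_true, List.countP_cons]
      rw [ih]
      have hd : ∀ n : Nat, ls.tail.drop n = ls.drop (n + 1) := by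
        intro n
        rw [← List.drop_one, List.drop_drop, Nat.add_comm]
      simp [hd]
    · simp only [List.cons_append, pvFillF, ha, Bool.false_eq_true, if_false, List.countP_cons]
      rw [ih]
      simp

lemma pv_fillF_irrel (x : List Char) :
    ∀ (ls extra : List Char), x.countP PySem.Chars.isalpha ≤ ls.length →
      pvFillF x (ls ++ extra) = pvFillF x ls := by
  induction x with
  | nil => intro ls extra h; simp [pvFillF]
  | cons c t ih =>
    intro ls extra h
    by_cases ha : PySem.Chars.isalpha c
    · have hls : ls ≠ [] := by
        intro hnil
        rw [hnil] at h
        simp [List.countP_cons, ha] at h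
      obtain ⟨a, ls', rfl⟩ := List.exists_cons_of_ne_nil hls
      simp only [pvFillF, ha, if_true, List.cons_append, List.head?_cons, List.tail_cons]
      rw [ih ls' extra (by
        simp only [List.countP_cons, ha, if_true, List.length_cons] at h; omega)]
    · simp only [pvFillF, ha, Bool.false_eq_true, if_false]
      rw [ih ls extra (by
        simp only [List.countP_cons, ha, Bool.false_eq_true, if_false, List.length_cons] at h
        omega)]

lemma pv_fix_eq_fillF :
    ∀ (tok ls : List Char), tok.countP PySem.Chars.isalpha ≤ ls.length →
      pvFix ls tok = pvFillF tok ls.reverse := by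
  intro tok
  induction tok with
  | nil => intro ls h; simp [pvFix, pvFillF]
  | cons c t ih =>
    intro ls h
    by_cases ha : PySem.Chars.isalpha c
    · have hls : ls ≠ [] := by
        intro hnil
        rw [hnil] at h
        simp [List.countP_cons, ha] at h
      obtain ⟨a, ha2⟩ := List.getLast?_isSome.mpr hls |> Option.isSome_iff_exists.mp
      simp only [pvFix, pvFillF, ha, if_true, List.head?_reverse, List.tail_reverse, ha2]
      rw [ih ls.dropLast (by
        simp only [List.countP_cons, ha, if_true, List.length_dropLast] at h ⊢
        have := List.length_pos_of_ne_nil hls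
        omega)]
      simp
    · simp only [pvFix, pvFillF, ha, Bool.false_eq_true, if_false]
      rw [ih ls (by simp only [List.countP_cons, ha, Bool.false_eq_true, if_false] at h; omega)]

lemma pv_main : ∀ (n : Nat) (cs : List Char), cs.length ≤ n →
    pvFillF cs (pvRes cs) = pvAltGo cs := by
  intro n
  induction n with
  | zero =>
    intro cs h
    have : cs = [] := List.eq_nil_of_length_eq_zero (Nat.le_zero.mp h)
    subst this
    simp [pvFillF, pvAltGo]
  | succ n ih =>
    intro cs h
    cases cs with
    | nil => simp [pvFillF, pvAltGo]
    | cons c t =>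
      by_cases hsp : PySem.Chars.isspace c
      · have hres : pvRes (c :: t) = pvRes t := by simp [pvRes, pvWsplit, hsp]
        have hna := pv_space_not_alpha hsp
        simp only [pvFillF, pvAltGo, hsp, hna, Bool.false_eq_true, if_false, if_true, hres]
        rw [ih t (by simpa using h)]
      · set tok := c :: t.takeWhile (fun x => !PySem.Chars.isspace x) with htok
        set rest := t.dropWhile (fun x => !PySem.Chars.isspace x) with hrest
        have hcs : c :: t = tok ++ rest := by
          rw [htok, hrest]
          simp [List.takeWhile_append_dropWhile]
        have hres : pvRes (c :: t) = (tok.filter PySem.Chars.isalpha).reverse ++ pvRes rest := by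
          simp [pvRes, pvWsplit, hsp, htok, hrest]
        have hcnt : tok.countP PySem.Chars.isalpha
            = (tok.filter PySem.Chars.isalpha).reverse.length := by
          simp [List.countP_eq_length_filter]
        calc pvFillF (c :: t) (pvRes (c :: t))
            = pvFillF (tok ++ rest) (pvRes (c :: t)) := by rw [← hcs]
          _ = pvFillF tok (pvRes (c :: t))
              ++ pvFillF rest ((pvRes (c :: t)).drop (tok.countP PySem.Chars.isalpha)) := by
              rw [pv_fillF_append]
          _ = pvFillF tok ((tok.filter PySem.Chars.isalpha).reverse)
              ++ pvFillF rest (pvRes rest) := by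
              rw [hres]
              congr 1
              · rw [pv_fillF_irrel tok _ _ (by rw [hcnt])]
              · rw [hcnt, List.drop_left]
          _ = pvFix (tok.filter PySem.Chars.isalpha) tok ++ pvAltGo rest := by
              congr 1
              · rw [pv_fix_eq_fillF tok _ (le_of_eq (by rw [hcnt, List.length_reverse]))]
              · exact ih rest (by
                  have : rest.length ≤ t.length := List.length_dropWhile_le _ _
                  simp at h
                  omega)
          _ = pvAltGo (c :: t) := by
              rw [pvAltGo]
              simp only [hsp, Bool.false_eq_true, if_false, ← htok, ← hrest]

lemma pv_join_nil (l : List (List Char)) : List.intercalate [] l = l.flatten := by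
  induction l with
  | nil => simp [List.intercalate]
  | cons a t ih =>
    cases t with
    | nil => simp [List.intercalate]
    | cons b t2 =>
      simp [List.intercalate, List.intersperse] at ih ⊢
      simpa using ih

-- ===== VERDICT (by name: the statement is the Claim_ definition above) =====
theorem reverse_non_symbols_spec : Claim_equal_reverse_non_symbols := by
  intro text _
  unfold Spec_reverse_non_symbols
  unfold reverse_non_symbols reverse_non_symbols_alt
  simp only []
  set cs := text.toList with hcs
  set L0 := ((PySem.List.enumerate cs).map (fun p : Int × Char => (p.1, ([p.2] : List Char)))) with hL0
  have hndE : (L0.map Prod.fst).Nodup := by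
    have hpl := PySem.List.pairwise_lt_enumerate cs 0
    rw [hL0, List.map_map]
    have : (Prod.fst ∘ fun p : Int × Char => (p.1, ([p.2] : List Char))) = Prod.fst := by
      funext p; rfl
    rw [this]
    have h2 : (PySem.List.enumerate cs 0).Pairwise (fun p q => p.1 ≠ q.1) :=
      hpl.imp (fun h => ne_of_lt h)
    exact (List.pairwise_map).mpr h2
  have h0 : (PySem.Dict.ofList L0).items = L0 := by
    rw [PySem.Dict.ofList, PySem.Dict.update]
    rw [PySem.Dict.items_foldl_insert_fresh L0 Prod.fst Prod.snd PySem.Dict.empty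
      (fun a _ => PySem.Dict.contains_empty a.1) hndE]
    simp [PySem.Dict.empty]
  rw [pv_res_eq]
  rw [h0]
  have h1 := pv_items_foldl_condins (fun p : Int × List Char => PySem.Chars.strIsalpha p.2)
    (fun _ => ([] : List Char)) L0 [] (PySem.Dict.ofList L0) (by simpa using h0)
    (by simpa using hndE)
  simp only [List.nil_append] at h1
  rw [h1]
  set L1 := L0.map (fun p : Int × List Char =>
    if PySem.Chars.strIsalpha p.2 then (p.1, ([] : List Char)) else p) with hL1
  have hndE1 : (L1.map Prod.fst).Nodup := by
    rw [hL1, List.map_map]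
    have : (Prod.fst ∘ fun p : Int × List Char =>
        if PySem.Chars.strIsalpha p.2 then (p.1, ([] : List Char)) else p) = Prod.fst := by
      funext p
      by_cases hc : PySem.Chars.strIsalpha p.2 <;> simp [hc]
    rw [this]
    exact hndE
  have h2 := pv_items_foldl_ctrins (pvRes cs) L1 []
    ((L0.foldl (fun d' p =>
      if PySem.Chars.strIsalpha p.2 then d'.insert p.1 ([] : List Char) else d')
      (PySem.Dict.ofList L0)))
    0 (by simpa using h1) (by simpa using hndE1)
  simp only [List.nil_append] at h2
  simp only [PySem.Dict.values]
  rw [h2]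
  simp only [PySem.Chars.join]
  rw [pv_join_nil]
  rw [hL1, hL0]
  rw [pv_chain (pvRes cs) cs 0 0]
  rw [show (0 : Int) = ((0 : Nat) : Int) by simp]
  rw [pv_fillA_eq_fillF (pvRes cs) cs 0]
  rw [List.drop_zero]
  exact congrArg _ (pv_main cs.length cs le_rfl)
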